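-- pv_equiv track=rewrite | github.com/kmartinez/picogps | simplemain.py | getnextalarm
-- ===== SOURCE A (Python) =====
-- schedule = [0,3,6,9,11,12,15,18,21]
--
-- def getnextalarm(hh):
-- 	nexttime = None
--
-- 	if(hh in schedule):
-- 		position = schedule.index(hh)
-- 		nextpos = position+1
-- 		if(nextpos>(len(schedule)-1)):
-- 			nextpos = 0
-- 		nexttime = schedule[nextpos]
-- 	else:
-- 		for i in schedule:
-- 			if(i>hh):
-- 				nexttime = i
-- 				break
-- 		if(nexttime==None):
-- 			nexttime = 0
-- 	return nexttime
-- ===== SOURCE B (Python) =====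
-- schedule = [0, 3, 6, 9, 11, 12, 15, 18, 21]
--
-- def getnextalarm(hh):
--     # binary search for the first schedule entry strictly greater than hh
--     lo, hi = 0, len(schedule)
--     while lo < hi:
--         mid = (lo + hi) // 2
--         if schedule[mid] <= hh:
--             lo = mid + 1
--         else:
--             hi = mid
--     return schedule[lo] if lo < len(schedule) else 0
-- ===== Notes on version B (the rewrite author's own statement) =====
-- stated objective: idiomatic
-- what changed: Replaced A's membership test + index/wraparound branch and linear scan with a single binary search (bisect_right by hand) over the sorted schedule, returning the element at the insertion point or 0 past the end.
import Mathlib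
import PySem

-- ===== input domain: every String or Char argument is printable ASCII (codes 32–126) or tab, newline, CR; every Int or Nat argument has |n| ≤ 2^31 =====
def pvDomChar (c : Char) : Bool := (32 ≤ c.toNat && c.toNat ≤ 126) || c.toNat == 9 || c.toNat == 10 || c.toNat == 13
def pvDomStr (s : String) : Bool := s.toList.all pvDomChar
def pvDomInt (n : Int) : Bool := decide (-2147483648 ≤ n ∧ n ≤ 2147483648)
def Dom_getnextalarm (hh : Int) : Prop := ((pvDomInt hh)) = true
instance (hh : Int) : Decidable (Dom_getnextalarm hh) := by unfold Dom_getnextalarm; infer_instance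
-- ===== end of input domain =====

-- B replaces A's membership/index/wraparound branches and linear scan by one binary search; objective: idiomatic.

-- ===== PORT A =====
def scheduleA : List Int := [0, 3, 6, 9, 11, 12, 15, 18, 21]

-- the 'for i in schedule: if i > hh: nexttime = i; break' loop
def findNextA : List Int → Int → Option Int
  | [], _ => none
  | i :: rest, hh => if i > hh then some i else findNextA rest hh

def getnextalarm (hh : Int) : Option Int :=
  if scheduleA.contains hh then
    match PySem.List.index? scheduleA hh with
    | none => none   -- unreachable: hh is in the list
    | some position =>
      let nextpos := position + 1
      let nextpos := if nextpos > (scheduleA.length : Int) - 1 then 0 else nextpos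
      PySem.List.pyGet? scheduleA nextpos
  else
    match findNextA scheduleA hh with
    | some i => some i
    | none => some 0

-- ===== PORT B =====
def scheduleB : List Int := [0, 3, 6, 9, 11, 12, 15, 18, 21]

-- the while-loop of B's hand-written bisect_right; the fuel argument only bounds
-- the number of iterations (hi - lo shrinks each step, so length fuel is plenty)
def bsLoop : Nat → Int → Nat → Nat → Nat
  | 0, _, lo, _ => lo
  | fuel + 1, hh, lo, hi =>
    if lo < hi then
      let mid := (lo + hi) / 2
      if scheduleB.getD mid 0 ≤ hh then bsLoop fuel hh (mid + 1) hi
      else bsLoop fuel hh lo mid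
    else lo

def getnextalarm_alt (hh : Int) : Option Int :=
  let lo := bsLoop scheduleB.length hh 0 scheduleB.length
  if lo < scheduleB.length then some (scheduleB.getD lo 0) else some 0

-- ===== PRECONDITION & SPEC =====
def Spec_getnextalarm (hh : Int) (out : Option Int) : Prop := out = getnextalarm_alt hh
instance (hh : Int) (out : Option Int) : Decidable (Spec_getnextalarm hh out) := by unfold Spec_getnextalarm; infer_instance

-- ===== CLAIM (what is proved, stated in full; the proofs are below) =====
def Claim_equal_getnextalarm : Prop := ∀ (hh : Int), Dom_getnextalarm hh → Spec_getnextalarm hh (getnextalarm hh)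

-- ===== LEMMAS AND PROOFS =====

-- ===== VERDICT (by name: the statement is the Claim_ definition above) =====
set_option maxHeartbeats 2000000 in
theorem getnextalarm_spec : Claim_equal_getnextalarm := by
  intro hh _
  show getnextalarm hh = getnextalarm_alt hh
  by_cases hmem : hh ∈ scheduleA
  · -- hh is one of the nine scheduled hours: check each by computation
    simp only [scheduleA, List.mem_cons, List.not_mem_nil, or_false] at hmem
    rcases hmem with rfl | rfl | rfl | rfl | rfl | rfl | rfl | rfl | rfl <;> decide
  · have hc : scheduleA.contains hh = false := by
      simpa using hmem
    simp only [scheduleA, List.mem_cons, List.not_mem_nil, or_false, not_or] at hmem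
    obtain ⟨h0, h3, h6, h9, h11, h12, h15, h18, h21⟩ := hmem
    norm_num [getnextalarm, getnextalarm_alt, hc, scheduleA, scheduleB, findNextA,
      bsLoop, List.getD]
    split_ifs <;> first | rfl | omega
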